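-- pv_equiv track=rewrite | github.com/ABI-Software/scaffoldmaker | src/scaffoldmaker/meshtypes/meshtype_3d_lung3.py | getBoxRowNodeIdentifiers
-- ===== SOURCE A (Python) =====
-- def getBoxRowNodeIdentifiers(elementsCountNormal, elementsCountOblique, nNodes, sNodeIdentifier=1):
--     """
--     Generates a list of node identifiers forming horizontal rows (y-direction) within a box core
--     structure inside an ellipsoid.
--     :param elementsCountNormal: Number of elements along the normal direction.
--     :param elementsCountOblique: Number of elements along the oblique direction.
--     :param nNodes: Total number of nodes.
--     :param sNodeIdentifier: Starting node identifier.
--     :return: List of identifiers for box nodes grouped in rows.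
--     """
--     boxRowNids = []
--     eNodeIdentifier = nNodes + sNodeIdentifier - 1
--
--     snid = sNodeIdentifier
--     for _ in range(2):
--         row = []
--         nid = snid
--         for _ in range(elementsCountNormal - 1):
--             row.append([nid + i for i in range(elementsCountOblique - 1)])
--             nid += elementsCountOblique - 1
--         boxRowNids.append(row)
--         snid = nid
--
--     for e1 in [-2, -1]:
--         row = []
--         sNodeIdentifier = eNodeIdentifier - ((elementsCountOblique - 1) * (elementsCountNormal - 1)) * abs(e1) + 1
--         for _ in range(elementsCountNormal - 1):
--             row.append([sNodeIdentifier + i for i in range(elementsCountOblique - 1)])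
--             sNodeIdentifier += elementsCountOblique - 1
--         boxRowNids.append(row)
--
--     return boxRowNids
-- ===== SOURCE B (Python) =====
-- def getBoxRowNodeIdentifiers(elementsCountNormal, elementsCountOblique, nNodes, sNodeIdentifier=1):
--     """Materialise the two contiguous identifier ranges (front pair of blocks and
--     end-anchored back pair) as flat lists, then slice them into rows and blocks."""
--     w = elementsCountOblique - 1
--     h = max(elementsCountNormal - 1, 0)
--     span = 2 * w * h
--     eNodeIdentifier = nNodes + sNodeIdentifier - 1
--     front = list(range(sNodeIdentifier, sNodeIdentifier + span))
--     back = list(range(eNodeIdentifier - span + 1, eNodeIdentifier + 1))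
--
--     def rows(flat):
--         return [flat[j * w:(j + 1) * w] for j in range(2 * h)]
--
--     fr = rows(front)
--     br = rows(back)
--     return [fr[:h], fr[h:], br[:h], br[h:]]
-- ===== Notes on version B (the rewrite author's own statement) =====
-- stated objective: alternative
-- what changed: Instead of computing each block's start and emitting rows with nested counters, B materialises the two contiguous identifier ranges (front pair and end-anchored back pair) as flat lists and obtains rows and blocks purely by slicing them.
import Mathlib
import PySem

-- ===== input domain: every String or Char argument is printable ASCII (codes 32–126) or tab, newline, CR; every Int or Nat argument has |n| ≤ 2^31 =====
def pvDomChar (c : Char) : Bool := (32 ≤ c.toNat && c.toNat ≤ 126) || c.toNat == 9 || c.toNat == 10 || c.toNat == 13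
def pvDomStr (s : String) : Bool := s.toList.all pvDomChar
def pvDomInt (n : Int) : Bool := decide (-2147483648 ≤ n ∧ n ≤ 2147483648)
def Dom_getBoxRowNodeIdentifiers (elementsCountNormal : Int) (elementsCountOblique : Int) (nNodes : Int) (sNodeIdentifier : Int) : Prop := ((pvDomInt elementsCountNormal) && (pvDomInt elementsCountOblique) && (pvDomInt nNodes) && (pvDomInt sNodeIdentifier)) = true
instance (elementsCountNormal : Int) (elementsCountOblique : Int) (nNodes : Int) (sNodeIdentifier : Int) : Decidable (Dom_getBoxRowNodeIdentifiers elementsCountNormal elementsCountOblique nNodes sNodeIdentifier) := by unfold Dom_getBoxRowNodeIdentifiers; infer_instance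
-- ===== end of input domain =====

-- B replaces A's per-block counter loops by materialising the two contiguous identifier
-- ranges as flat lists and slicing them into rows and blocks (objective: alternative).

-- ===== PORT A =====
-- A's inner 'for _ in range(elementsCountNormal - 1)' loop over state (row, nid);
-- the same loop body appears verbatim in both of A's passes, so it is one helper here.
def pvRowLoopA (elementsCountNormal : Int) (elementsCountOblique : Int) (s : Int) :
    List (List Int) × Int :=
  (PySem.List.pyRange 0 (elementsCountNormal - 1) 1).foldl
    (fun (p : List (List Int) × Int) (_ : Int) =>
      (p.1 ++ [(PySem.List.pyRange 0 (elementsCountOblique - 1) 1).map (fun i => p.2 + i)],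
       p.2 + (elementsCountOblique - 1)))
    ([], s)

def getBoxRowNodeIdentifiers (elementsCountNormal : Int) (elementsCountOblique : Int) (nNodes : Int) (sNodeIdentifier : Int) : List (List (List Int)) :=
  let eNodeIdentifier := nNodes + sNodeIdentifier - 1
  -- first loop: two passes threading snid
  let st := (PySem.List.pyRange 0 2 1).foldl
    (fun (st : List (List (List Int)) × Int) (_ : Int) =>
      let r := pvRowLoopA elementsCountNormal elementsCountOblique st.2
      (st.1 ++ [r.1], r.2))
    ([], sNodeIdentifier)
  -- second loop: for e1 in [-2, -1], end-anchored starts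
  ([(-2 : Int), -1]).foldl
    (fun acc e1 =>
      let s0 := eNodeIdentifier - ((elementsCountOblique - 1) * (elementsCountNormal - 1)) * |e1| + 1
      acc ++ [(pvRowLoopA elementsCountNormal elementsCountOblique s0).1])
    st.1

-- ===== PORT B =====
-- B: 'rows(flat)' slices a flat identifier list into rows of width w.
def pvRowsB (w : Int) (h : Int) (flat : List Int) : List (List Int) :=
  (PySem.List.pyRange 0 (2 * h) 1).map (fun j =>
    PySem.List.slice flat (some (j * w)) (some ((j + 1) * w)))

def getBoxRowNodeIdentifiers_alt (elementsCountNormal : Int) (elementsCountOblique : Int) (nNodes : Int) (sNodeIdentifier : Int) : List (List (List Int)) :=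
  let w := elementsCountOblique - 1
  let h := max (elementsCountNormal - 1) 0
  let span := 2 * w * h
  let eNodeIdentifier := nNodes + sNodeIdentifier - 1
  let front := PySem.List.pyRange sNodeIdentifier (sNodeIdentifier + span) 1
  let back := PySem.List.pyRange (eNodeIdentifier - span + 1) (eNodeIdentifier + 1) 1
  let fr := pvRowsB w h front
  let br := pvRowsB w h back
  [PySem.List.slice fr none (some h), PySem.List.slice fr (some h) none,
   PySem.List.slice br none (some h), PySem.List.slice br (some h) none]

-- ===== PRECONDITION & SPEC =====
def Spec_getBoxRowNodeIdentifiers (elementsCountNormal : Int) (elementsCountOblique : Int) (nNodes : Int) (sNodeIdentifier : Int) (out : List (List (List Int))) : Prop := out = getBoxRowNodeIdentifiers_alt elementsCountNormal elementsCountOblique nNodes sNodeIdentifier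
instance (elementsCountNormal : Int) (elementsCountOblique : Int) (nNodes : Int) (sNodeIdentifier : Int) (out : List (List (List Int))) : Decidable (Spec_getBoxRowNodeIdentifiers elementsCountNormal elementsCountOblique nNodes sNodeIdentifier out) := by unfold Spec_getBoxRowNodeIdentifiers; infer_instance

-- ===== CLAIM (what is proved, stated in full; the proofs are below) =====
def Claim_equal_getBoxRowNodeIdentifiers : Prop := ∀ (elementsCountNormal : Int) (elementsCountOblique : Int) (nNodes : Int) (sNodeIdentifier : Int), Dom_getBoxRowNodeIdentifiers elementsCountNormal elementsCountOblique nNodes sNodeIdentifier → Spec_getBoxRowNodeIdentifiers elementsCountNormal elementsCountOblique nNodes sNodeIdentifier (getBoxRowNodeIdentifiers elementsCountNormal elementsCountOblique nNodes sNodeIdentifier)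

-- ===== LEMMAS AND PROOFS =====

-- canonical block form both sides are reduced to: H rows of width w starting at t
def pvBlockN (w : Int) (H : Nat) (t : Int) : List (List Int) :=
  (List.range H).map (fun (j : Nat) =>
    (PySem.List.pyRange 0 w 1).map (fun i => t + (j : Int) * w + i))

-- ---- A side ----
lemma pvFoldA_range (eO : Int) (n : Nat) (s : Int) (acc : List (List Int)) :
    (List.range n).foldl
      (fun (p : List (List Int) × Int) (_ : Nat) =>
        (p.1 ++ [(PySem.List.pyRange 0 (eO - 1) 1).map (fun i => p.2 + i)],
         p.2 + (eO - 1)))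
      (acc, s)
    = (acc ++ (List.range n).map (fun (j : Nat) =>
         (PySem.List.pyRange 0 (eO - 1) 1).map (fun i => s + ((j : Int)) * (eO - 1) + i)),
       s + (n : Int) * (eO - 1)) := by
  induction n generalizing s acc with
  | zero => simp
  | succ n ih =>
    rw [List.range_succ, List.foldl_append, ih, List.map_append]
    simp only [List.foldl_cons, List.foldl_nil, List.map_cons, List.map_nil, List.append_assoc,
      Prod.mk.injEq]
    exact ⟨trivial, by push_cast; ring⟩

lemma pvRowLoopA_eq (eN eO s : Int) :
    pvRowLoopA eN eO s
      = (pvBlockN (eO - 1) (eN - 1).toNat s, s + (((eN - 1).toNat : Int)) * (eO - 1)) := by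
  unfold pvRowLoopA pvBlockN
  rw [PySem.List.pyRange_one 0 (eN - 1), List.foldl_map]
  simp only [Int.sub_zero]
  rw [pvFoldA_range]
  simp

-- ---- B side ----
lemma pvDrop_pyRange (a b : Int) (k : Nat) :
    (PySem.List.pyRange a b 1).drop k = PySem.List.pyRange (a + k) b 1 := by
  apply List.ext_getElem
  · simp [PySem.List.length_pyRange_one]; omega
  · intro m h1 h2
    simp [PySem.List.getElem_pyRange_one]
    push_cast; ring

lemma pvTake_pyRange (a b : Int) (k : Nat) :
    (PySem.List.pyRange a b 1).take k = PySem.List.pyRange a (min (a + k) b) 1 := by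
  apply List.ext_getElem
  · simp [PySem.List.length_pyRange_one]; omega
  · intro m h1 h2
    simp [PySem.List.getElem_pyRange_one]

lemma pvShift_pyRange (t w : Int) :
    PySem.List.pyRange t (t + w) 1 = (PySem.List.pyRange 0 w 1).map (fun i => t + i) := by
  rw [PySem.List.pyRange_one t (t + w), PySem.List.pyRange_one 0 w, List.map_map]
  simp only [add_sub_cancel_left, Int.sub_zero]
  apply List.map_congr_left
  intro k _
  simp

-- one row sliced out of the flat range equals the comprehension row
lemma pvRowB_eq (w h s j : Int) (hh : 0 ≤ h) (h0 : 0 ≤ j) (hj : j < 2 * h) :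
    PySem.List.slice (PySem.List.pyRange s (s + 2 * w * h) 1) (some (j * w)) (some ((j + 1) * w))
      = (PySem.List.pyRange 0 w 1).map (fun i => s + j * w + i) := by
  by_cases hw : w ≤ 0
  · have hspan : s + 2 * w * h ≤ s := by nlinarith
    rw [PySem.List.pyRange_one_eq_nil hspan, PySem.List.pyRange_one_eq_nil hw]
    simp [PySem.List.slice]
  · have hwpos : (0:Int) < w := by omega
    have hjw : 0 ≤ j * w := by positivity
    have hjw1 : 0 ≤ (j + 1) * w := by positivity
    rw [PySem.List.slice_toNat _ hjw hjw1, pvDrop_pyRange, pvTake_pyRange]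
    have h1 : ((j * w).toNat : Int) = j * w := Int.toNat_of_nonneg hjw
    have h2 : ((j + 1) * w).toNat - (j * w).toNat = w.toNat := by
      have hd : (j + 1) * w = j * w + w := by ring
      rw [hd]
      omega
    rw [h2, h1]
    have h3 : min (s + j * w + (w.toNat : Int)) (s + 2 * w * h) = s + j * w + w := by
      have hw' : (w.toNat : Int) = w := Int.toNat_of_nonneg (le_of_lt hwpos)
      rw [hw']
      apply min_eq_left
      nlinarith
    rw [h3]
    have : s + j * w + w = (s + j * w) + w := by ring
    rw [this, pvShift_pyRange]

-- the rows of a flat contiguous range split into the two stacked blocks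
lemma pvRowsB_split (w h s : Int) (hh : 0 ≤ h) :
    pvRowsB w h (PySem.List.pyRange s (s + 2 * w * h) 1)
      = pvBlockN w h.toNat s ++ pvBlockN w h.toNat (s + h * w) := by
  unfold pvRowsB
  rw [PySem.List.pyRange_zero (2 * h), List.map_map]
  have h2 : (2 * h).toNat = h.toNat + h.toNat := by omega
  rw [h2, List.range_add, List.map_append, List.map_map]
  unfold pvBlockN
  congr 1
  · apply List.map_congr_left
    intro k hk
    simp only [List.mem_range] at hk
    simp only [Function.comp_apply]
    rw [pvRowB_eq w h s k hh (by positivity) (by omega)]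
  · apply List.map_congr_left
    intro k hk
    simp only [List.mem_range] at hk
    simp only [Function.comp_apply]
    push_cast
    rw [pvRowB_eq w h s ((h.toNat : Int) + k) hh (by positivity) (by omega)]
    apply List.map_congr_left
    intro i _
    have hhn : (h.toNat : Int) = h := Int.toNat_of_nonneg hh
    rw [hhn]
    ring_nf

lemma pvBlockN_length (w : Int) (H : Nat) (t : Int) : (pvBlockN w H t).length = H := by
  simp [pvBlockN]

-- B's port reduced to the four canonical blocks
lemma pvAlt_eq (eN eO nNodes s : Int) :
    getBoxRowNodeIdentifiers_alt eN eO nNodes s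
      = [pvBlockN (eO - 1) (max (eN - 1) 0).toNat s,
         pvBlockN (eO - 1) (max (eN - 1) 0).toNat (s + max (eN - 1) 0 * (eO - 1)),
         pvBlockN (eO - 1) (max (eN - 1) 0).toNat
           (nNodes + s - 1 - 2 * (eO - 1) * max (eN - 1) 0 + 1),
         pvBlockN (eO - 1) (max (eN - 1) 0).toNat
           (nNodes + s - 1 - (eO - 1) * max (eN - 1) 0 + 1)] := by
  unfold getBoxRowNodeIdentifiers_alt
  simp only
  set w := eO - 1
  set h := max (eN - 1) 0 with hh_def
  have hh : 0 ≤ h := le_max_right _ _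
  have hback : nNodes + s - 1 + 1 = (nNodes + s - 1 - 2 * w * h + 1) + 2 * w * h := by ring
  rw [hback, pvRowsB_split w h s hh, pvRowsB_split w h _ hh]
  have hlen := pvBlockN_length w h.toNat s
  have hlen2 := pvBlockN_length w h.toNat (nNodes + s - 1 - 2 * w * h + 1)
  have hhn : (h.toNat : Int) = h := Int.toNat_of_nonneg hh
  rw [PySem.List.slice_to _ hh, PySem.List.slice_to _ hh,
      PySem.List.slice_from _ hh, PySem.List.slice_from _ hh,
      List.take_left' hlen, List.take_left' hlen2,
      List.drop_left' hlen, List.drop_left' hlen2]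
  have e2 : nNodes + s - 1 - 2 * w * h + 1 + h * w
      = nNodes + s - 1 - w * h + 1 := by ring
  rw [e2]

-- ===== VERDICT (by name: the statement is the Claim_ definition above) =====
theorem getBoxRowNodeIdentifiers_spec : Claim_equal_getBoxRowNodeIdentifiers := by
  intro eN eO nNodes s _
  show _ = _
  rw [pvAlt_eq]
  unfold getBoxRowNodeIdentifiers
  have h2 : PySem.List.pyRange 0 2 1 = [0, 1] := by decide
  rw [h2]
  simp only [List.foldl_cons, List.foldl_nil, pvRowLoopA_eq, List.nil_append]
  have habs2 : |(-2 : Int)| = 2 := by decide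
  have habs1 : |(-1 : Int)| = 1 := by decide
  rw [habs2, habs1]
  have hmax : (max (eN - 1) 0).toNat = (eN - 1).toNat := by omega
  by_cases h : eN - 1 ≤ 0
  · have hz : (eN - 1).toNat = 0 := by omega
    simp [hmax, hz, pvBlockN]
  · have hn : ((eN - 1).toNat : Int) = eN - 1 := by omega
    have hm : max (eN - 1) 0 = eN - 1 := by omega
    rw [hmax, hm, hn]
    have e2 : s + (eN - 1) * (eO - 1) = s + (eN - 1) * (eO - 1) := rfl
    have e3 : nNodes + s - 1 - (eO - 1) * (eN - 1) * 2 + 1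
        = nNodes + s - 1 - 2 * (eO - 1) * (eN - 1) + 1 := by ring
    rw [e3, mul_one]
    simp
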